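-- pv_equiv track=rewrite | github.com/new-ge/API_6SEM_BACK_END | api_6sem_back_end/ml/train_faq.py | map_to_theme
-- ===== SOURCE A (Python) =====
-- def map_to_theme(question):
--     q = question.lower()
--
--     if any(kw in q for kw in ["ringtone", "wallpaper", "customize", "customization", "watch face", "visual elements", "personalize"]):
--         return "Personalização e Usabilidade"
--     elif any(kw in q for kw in ["health", "workout", "activity", "maps", "music", "reminders", "calls", "messages", "apps"]):
--         return "Funcionalidades e Apps"
--     elif any(kw in q for kw in ["display settings", "reset", "factory", "screenshot", "clear cache", "update"]):
--         return "Configurações e Manutenção"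
--     elif any(kw in q for kw in ["privacy", "security", "erase"]):
--         return "Privacidade e Segurança"
--     elif any(kw in q for kw in ["battery", "prolong usage", "performance"]):
--         return "Otimização e Performance"
--     elif any(kw in q for kw in ["backup", "restore"]):
--         return "Backup e Restauração"
--     elif any(kw in q for kw in ["siri", "shortcuts", "translate", "safari", "get help", "assistant"]):
--         return "Assistência, Automação e Acesso Web"
--     else:
--         return "OUTROS"
-- ===== SOURCE B (Python) =====
-- THEMES = [
--     ("Personalização e Usabilidade", ["ringtone", "wallpaper", "customize", "customization", "watch face", "visual elements", "personalize"]),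
--     ("Funcionalidades e Apps", ["health", "workout", "activity", "maps", "music", "reminders", "calls", "messages", "apps"]),
--     ("Configurações e Manutenção", ["display settings", "reset", "factory", "screenshot", "clear cache", "update"]),
--     ("Privacidade e Segurança", ["privacy", "security", "erase"]),
--     ("Otimização e Performance", ["battery", "prolong usage", "performance"]),
--     ("Backup e Restauração", ["backup", "restore"]),
--     ("Assistência, Automação e Acesso Web", ["siri", "shortcuts", "translate", "safari", "get help", "assistant"]),
-- ]
--
-- # Flat keyword -> (priority, theme) index; all 36 keywords are distinct.
-- KEYWORD_INDEX = {kw: (prio, name) for prio, (name, kws) in enumerate(THEMES) for kw in kws}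
--
-- def map_to_theme(question):
--     q = question.lower()
--     best = None
--     for kw, (prio, name) in KEYWORD_INDEX.items():
--         if kw in q and (best is None or prio < best[0]):
--             best = (prio, name)
--     return "OUTROS" if best is None else best[1]
-- ===== Notes on version B (the rewrite author's own statement) =====
-- stated objective: alternative
-- what changed: Replaced the short-circuiting if/elif chain over grouped keyword lists with a flat keyword->(priority, theme) dict built once and a single exhaustive pass that keeps the minimum-priority matching keyword (argmin fold), returning OUTROS when no keyword matches.
import Mathlib
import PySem

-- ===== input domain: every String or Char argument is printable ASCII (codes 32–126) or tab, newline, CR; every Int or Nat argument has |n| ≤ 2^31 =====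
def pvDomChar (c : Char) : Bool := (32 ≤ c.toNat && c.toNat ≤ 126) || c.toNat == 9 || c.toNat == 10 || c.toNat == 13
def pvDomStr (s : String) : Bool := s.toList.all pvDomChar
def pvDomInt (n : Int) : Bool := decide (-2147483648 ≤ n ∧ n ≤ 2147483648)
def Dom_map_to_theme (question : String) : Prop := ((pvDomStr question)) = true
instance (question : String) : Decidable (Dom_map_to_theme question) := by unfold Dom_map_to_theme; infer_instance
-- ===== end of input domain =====

-- B replaces A's if/elif chain by a single exhaustive pass over a flat keyword -> (priority, theme) index, keeping the minimum-priority match (alternative; same cost).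


-- ===== PORT A =====
def map_to_theme (question : String) : String :=
  let q := PySem.Str.lower question
  if ["ringtone", "wallpaper", "customize", "customization", "watch face", "visual elements", "personalize"].any (fun kw => PySem.Str.isIn kw q) then
    "Personalização e Usabilidade"
  else if ["health", "workout", "activity", "maps", "music", "reminders", "calls", "messages", "apps"].any (fun kw => PySem.Str.isIn kw q) then
    "Funcionalidades e Apps"
  else if ["display settings", "reset", "factory", "screenshot", "clear cache", "update"].any (fun kw => PySem.Str.isIn kw q) then
    "Configurações e Manutenção"
  else if ["privacy", "security", "erase"].any (fun kw => PySem.Str.isIn kw q) then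
    "Privacidade e Segurança"
  else if ["battery", "prolong usage", "performance"].any (fun kw => PySem.Str.isIn kw q) then
    "Otimização e Performance"
  else if ["backup", "restore"].any (fun kw => PySem.Str.isIn kw q) then
    "Backup e Restauração"
  else if ["siri", "shortcuts", "translate", "safari", "get help", "assistant"].any (fun kw => PySem.Str.isIn kw q) then
    "Assistência, Automação e Acesso Web"
  else
    "OUTROS"

-- ===== PORT B =====
def pvThemes : List (String × List String) :=
  [("Personalização e Usabilidade", ["ringtone", "wallpaper", "customize", "customization", "watch face", "visual elements", "personalize"]),
   ("Funcionalidades e Apps", ["health", "workout", "activity", "maps", "music", "reminders", "calls", "messages", "apps"]),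
   ("Configurações e Manutenção", ["display settings", "reset", "factory", "screenshot", "clear cache", "update"]),
   ("Privacidade e Segurança", ["privacy", "security", "erase"]),
   ("Otimização e Performance", ["battery", "prolong usage", "performance"]),
   ("Backup e Restauração", ["backup", "restore"]),
   ("Assistência, Automação e Acesso Web", ["siri", "shortcuts", "translate", "safari", "get help", "assistant"])]

-- flat keyword -> (priority, theme) index (Source B's KEYWORD_INDEX; all 36 keywords are distinct)
def pvKeywordIndex : List (String × Int × String) :=
  (PySem.List.enumerate pvThemes).flatMap (fun pt => pt.2.2.map (fun kw => (kw, pt.1, pt.2.1)))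

-- one step of Source B's loop: 'if kw in q and (best is None or prio < best[0]): best = (prio, name)'
def pvStep (q : String) (best : Option (Int × String)) (p : String × Int × String) : Option (Int × String) :=
  if PySem.Str.isIn p.1 q && (match best with | none => true | some b => decide (p.2.1 < b.1)) then some p.2 else best

def map_to_theme_alt (question : String) : String :=
  let q := PySem.Str.lower question
  match pvKeywordIndex.foldl (pvStep q) none with
  | none => "OUTROS"
  | some b => b.2

-- ===== PRECONDITION & SPEC =====
def Spec_map_to_theme (question : String) (out : String) : Prop := out = map_to_theme_alt question
instance (question : String) (out : String) : Decidable (Spec_map_to_theme question out) := by unfold Spec_map_to_theme; infer_instance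

-- ===== CLAIM (what is proved, stated in full; the proofs are below) =====
def Claim_equal_map_to_theme : Prop := ∀ (question : String), Dom_map_to_theme question → Spec_map_to_theme question (map_to_theme question)

-- ===== LEMMAS AND PROOFS =====

-- proof-only helpers: the flat index split into groups with indices from n, and the first-match chain with indices from n
def pvFlatFrom (n : Int) : List (String × List String) → List (String × Int × String)
  | [] => []
  | (name, kws) :: rest => kws.map (fun kw => (kw, n, name)) ++ pvFlatFrom (n+1) rest

def pvChainIdx (n : Int) (q : String) : List (String × List String) → Option (Int × String)
  | [] => none
  | (name, kws) :: rest =>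
      if kws.any (fun kw => PySem.Str.isIn kw q) then some (n, name) else pvChainIdx (n+1) q rest

theorem pvFlat_eq : pvKeywordIndex = pvFlatFrom 0 pvThemes := rfl

-- once best = (i, name) with i ≤ j, a group at priority j never overwrites it
theorem pvHold (q : String) (kws : List String) (j : Int) (nm : String) (i : Int) (name : String)
    (h : i ≤ j) :
    List.foldl (pvStep q) (some (i, name)) (kws.map (fun kw => (kw, j, nm))) = some (i, name) := by
  induction kws with
  | nil => rfl
  | cons kw rest ih =>
      have hj : ¬ j < i := by omega
      simp [pvStep, hj, ih]

-- a group with no matching keyword leaves best unchanged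
theorem pvSkip (q : String) (kws : List String) (j : Int) (nm : String)
    (acc : Option (Int × String)) (h : kws.any (fun kw => PySem.Str.isIn kw q) = false) :
    List.foldl (pvStep q) acc (kws.map (fun kw => (kw, j, nm))) = acc := by
  induction kws generalizing acc with
  | nil => rfl
  | cons kw rest ih =>
      simp only [List.any_cons, Bool.or_eq_false_iff] at h
      have h1 : PySem.Chars.isIn kw.toList q.toList = false := h.1
      simp [pvStep, h1, ih _ h.2]

-- from best = None, a group with a matching keyword sets best = (its priority, its name)
theorem pvHit (q : String) (kws : List String) (j : Int) (nm : String)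
    (h : kws.any (fun kw => PySem.Str.isIn kw q) = true) :
    List.foldl (pvStep q) none (kws.map (fun kw => (kw, j, nm))) = some (j, nm) := by
  induction kws with
  | nil => simp at h
  | cons kw rest ih =>
      by_cases hk : PySem.Str.isIn kw q = true
      · have hk1 : PySem.Chars.isIn kw.toList q.toList = true := hk
        simp [pvStep, hk1, pvHold q rest j nm j nm (le_refl j)]
      · simp only [List.any_cons, Bool.or_eq_true] at h
        rcases h with h | h
        · exact absurd h hk
        · have hk1 : PySem.Chars.isIn kw.toList q.toList = false := by
            simpa using hk
          simp [pvStep, hk1, ih h]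

-- best = (i, name) survives all remaining groups at priorities ≥ k ≥ i
theorem pvHoldFlat (q : String) (themes : List (String × List String)) :
    ∀ (k i : Int) (name : String), i ≤ k →
    List.foldl (pvStep q) (some (i, name)) (pvFlatFrom k themes) = some (i, name) := by
  induction themes with
  | nil => intro k i name _; rfl
  | cons t rest ih =>
      intro k i name h
      obtain ⟨nm, kws⟩ := t
      simp only [pvFlatFrom, List.foldl_append, pvHold q kws k nm i name h]
      exact ih (k+1) i name (by omega)

-- the exhaustive argmin fold over the flat index equals the first-match chain
theorem pvFold_eq_chain (q : String) (themes : List (String × List String)) :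
    ∀ n : Int, List.foldl (pvStep q) none (pvFlatFrom n themes) = pvChainIdx n q themes := by
  induction themes with
  | nil => intro n; rfl
  | cons t rest ih =>
      intro n
      obtain ⟨nm, kws⟩ := t
      by_cases h : kws.any (fun kw => PySem.Str.isIn kw q) = true
      · simp only [pvFlatFrom, List.foldl_append, pvHit q kws n nm h, pvChainIdx, h, if_true]
        exact pvHoldFlat q rest (n+1) n nm (by omega)
      · rw [Bool.not_eq_true] at h
        simp only [pvFlatFrom, List.foldl_append, pvSkip q kws n nm none h, pvChainIdx, h,
          Bool.false_eq_true, if_false]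
        exact ih (n+1)

-- ===== VERDICT (by name: the statement is the Claim_ definition above) =====
theorem map_to_theme_spec : Claim_equal_map_to_theme := by
  intro question _
  unfold Spec_map_to_theme
  simp only [map_to_theme, map_to_theme_alt, pvFlat_eq, pvFold_eq_chain]
  simp only [pvChainIdx, pvThemes]
  split_ifs <;> rfl
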